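-- pv_equiv track=rewrite | github.com/maximilian-svg/noid-document-api | app/services/coverage_validator.py | validate_section_coverage
-- ===== SOURCE A (Python) =====
-- SECTION_PREFIXES = {
--     "Lifestyle": ["LIFESTYLE_"],
--     "HRV": ["HRV_", "EMOTIONAL_"],
--     "GSR": ["GSR_"],
--     "Vascular": ["VASCULAR_"],
-- }
--
-- def _belongs_to_section(tag: str, prefixes: list[str]) -> bool:
--     return any(tag.startswith(prefix) for prefix in prefixes)
--
-- def validate_section_coverage(tags: dict) -> dict:
--     coverage = {}
--
--     for section, prefixes in SECTION_PREFIXES.items():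
--         result_keys = [
--             key for key in tags.keys()
--             if key.endswith("_RESULT") and _belongs_to_section(key, prefixes)
--         ]
--
--         filled = sum(1 for key in result_keys if str(tags.get(key, "")).strip())
--         total = len(result_keys)
--
--         coverage[section] = {
--             "filled": filled,
--             "total": total,
--         }
--
--     return coverage
-- ===== SOURCE B (Python) =====
-- SECTION_PREFIXES = {
--     "Lifestyle": ["LIFESTYLE_"],
--     "HRV": ["HRV_", "EMOTIONAL_"],
--     "GSR": ["GSR_"],
--     "Vascular": ["VASCULAR_"],
-- }
--
-- def validate_section_coverage(tags: dict) -> dict: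
--     coverage = {section: {"filled": 0, "total": 0} for section in SECTION_PREFIXES}
--     for key, value in tags.items():
--         if not key.endswith("_RESULT"):
--             continue
--         for section, prefixes in SECTION_PREFIXES.items():
--             if any(key.startswith(prefix) for prefix in prefixes):
--                 entry = coverage[section]
--                 entry["total"] += 1
--                 if str(value).strip():
--                     entry["filled"] += 1
--                 break
--     return coverage
-- ===== Notes on version B (the rewrite author's own statement) =====
-- stated objective: alternative
-- what changed: Single pass over tags.items() routing each *_RESULT key to its (first-matching, in fact unique) section and bumping pre-seeded counters, instead of rescanning the whole key set once per section with a filter+sum.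
import Mathlib
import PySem

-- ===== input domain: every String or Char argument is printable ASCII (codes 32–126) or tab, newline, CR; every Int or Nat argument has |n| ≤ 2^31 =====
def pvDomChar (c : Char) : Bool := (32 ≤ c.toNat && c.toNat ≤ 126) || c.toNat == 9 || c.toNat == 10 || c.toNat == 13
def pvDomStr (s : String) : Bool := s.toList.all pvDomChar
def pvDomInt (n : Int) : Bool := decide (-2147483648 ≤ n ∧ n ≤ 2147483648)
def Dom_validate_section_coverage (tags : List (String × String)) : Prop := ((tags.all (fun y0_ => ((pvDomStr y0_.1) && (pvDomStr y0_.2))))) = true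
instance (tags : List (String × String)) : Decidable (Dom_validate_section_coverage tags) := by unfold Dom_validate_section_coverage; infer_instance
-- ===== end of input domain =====

-- B replaces A's per-section rescans of the key set by one pass over the items that routes
-- each *_RESULT key to its section (objective: alternative, same cost class).

-- ===== PORT A =====
def SECTION_PREFIXES : List (String × List String) :=
  [("Lifestyle", ["LIFESTYLE_"]), ("HRV", ["HRV_", "EMOTIONAL_"]),
   ("GSR", ["GSR_"]), ("Vascular", ["VASCULAR_"])]

def belongs_to_section (tag : String) (prefixes : List String) : Bool :=
  prefixes.any (fun p => PySem.Str.startswith tag p)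

-- tags.get(key, "") on the association list: first match (the dict convention)
def dictGetD (tags : List (String × String)) (k : String) : String :=
  ((tags.find? (fun kv => kv.1 == k)).map Prod.snd).getD ""

def validate_section_coverage (tags : List (String × String)) : List (String × List (String × Int)) :=
  SECTION_PREFIXES.foldl
    (fun coverage sp =>
      let result_keys :=
        (tags.map Prod.fst).filter
          (fun k => PySem.Str.endswith k "_RESULT" && belongs_to_section k sp.2)
      let filled : Int :=
        (result_keys.countP (fun k => PySem.Str.strip (dictGetD tags k) != "") : Nat)
      let total : Int := (result_keys.length : Nat)
      coverage ++ [(sp.1, [("filled", filled), ("total", total)])])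
    []

-- ===== PORT B =====
-- coverage seeded with every section at {filled: 0, total: 0}
def seedCoverage : List (String × List (String × Int)) :=
  SECTION_PREFIXES.map (fun sp => (sp.1, [("filled", (0 : Int)), ("total", (0 : Int))]))

-- the inner 'for section, prefixes … if any(startswith) … break' loop
def routeSection (key : String) : Option String :=
  (SECTION_PREFIXES.find? (fun sp => belongs_to_section key sp.2)).map Prod.fst

-- entry["total"] += 1 and, if fill, entry["filled"] += 1, on coverage[s]
def bump (cov : List (String × List (String × Int))) (s : String) (fill : Bool) :
    List (String × List (String × Int)) :=
  cov.map (fun row =>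
    if row.1 == s then
      (row.1, row.2.map (fun c =>
        if c.1 == "total" || (fill && c.1 == "filled") then (c.1, c.2 + 1) else c))
    else row)

-- the body of the for-loop over tags.items()
def stepB (cov : List (String × List (String × Int))) (kv : String × String) :
    List (String × List (String × Int)) :=
  if !(PySem.Str.endswith kv.1 "_RESULT") then cov
  else
    match routeSection kv.1 with
    | some s => bump cov s (PySem.Str.strip kv.2 != "")
    | none => cov

def validate_section_coverage_alt (tags : List (String × String)) : List (String × List (String × Int)) :=
  tags.foldl stepB seedCoverage

-- ===== PRECONDITION & SPEC =====
-- Pre_ excludes association lists with duplicate keys: those do not arise from a Python dict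
-- (the real argument), and on them the assoc-list reading of A (first-match lookup for every
-- occurrence) and of B (each pair's own value) are both accidental.
def Pre_validate_section_coverage (tags : List (String × String)) : Prop :=
  (tags.map Prod.fst).Nodup
instance (tags : List (String × String)) : Decidable (Pre_validate_section_coverage tags) := by
  unfold Pre_validate_section_coverage; infer_instance

def pvWitness_validate_section_coverage : (List (String × String)) :=
  [("HRV_A_RESULT", " x "), ("GSR_B_RESULT", " "), ("LIFESTYLE_C", "y")]

def Spec_validate_section_coverage (tags : List (String × String)) (out : List (String × List (String × Int))) : Prop := out = validate_section_coverage_alt tags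
instance (tags : List (String × String)) (out : List (String × List (String × Int))) : Decidable (Spec_validate_section_coverage tags out) := by unfold Spec_validate_section_coverage; infer_instance

-- ===== CLAIM (what is proved, stated in full; the proofs are below) =====
def Claim_equal_validate_section_coverage : Prop := ∀ (tags : List (String × String)), Dom_validate_section_coverage tags → Pre_validate_section_coverage tags → Spec_validate_section_coverage tags (validate_section_coverage tags)

-- ===== LEMMAS AND PROOFS =====

-- per-section counters, phrased over the pair list (each pair's own value)
def totC (tags : List (String × String)) (ps : List String) : Nat :=
  tags.countP (fun kv => PySem.Str.endswith kv.1 "_RESULT" && belongs_to_section kv.1 ps)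
def filC (tags : List (String × String)) (ps : List String) : Nat :=
  tags.countP (fun kv => PySem.Str.endswith kv.1 "_RESULT" && belongs_to_section kv.1 ps
                 && PySem.Str.strip kv.2 != "")

-- two prefixes neither of which extends the other cannot both start the same string
theorem sw_excl {s p q : String} (h1 : ¬ p.toList <+: q.toList) (h2 : ¬ q.toList <+: p.toList)
    (hp : PySem.Str.startswith s p = true) : PySem.Str.startswith s q = false := by
  by_contra h
  have hq : PySem.Str.startswith s q = true := by simpa using h
  rw [PySem.Str.startswith_eq] at hp hq
  have hp' := (PySem.Chars.startswith_iff _ _).1 hp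
  have hq' := (PySem.Chars.startswith_iff _ _).1 hq
  rcases List.prefix_or_prefix_of_prefix hp' hq' with h | h
  exacts [h1 h, h2 h]

theorem excl_L {k : String} (h : belongs_to_section k ["LIFESTYLE_"] = true) :
    belongs_to_section k ["HRV_", "EMOTIONAL_"] = false ∧
    belongs_to_section k ["GSR_"] = false ∧ belongs_to_section k ["VASCULAR_"] = false := by
  simp only [belongs_to_section, List.any_cons, List.any_nil, Bool.or_false] at h ⊢
  exact ⟨by rw [sw_excl (by decide) (by decide) h, sw_excl (by decide) (by decide) h]; rfl,
    sw_excl (by decide) (by decide) h, sw_excl (by decide) (by decide) h⟩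

theorem excl_H {k : String} (h : belongs_to_section k ["HRV_", "EMOTIONAL_"] = true) :
    belongs_to_section k ["LIFESTYLE_"] = false ∧
    belongs_to_section k ["GSR_"] = false ∧ belongs_to_section k ["VASCULAR_"] = false := by
  simp only [belongs_to_section, List.any_cons, List.any_nil, Bool.or_false, Bool.or_eq_true] at h ⊢
  rcases h with h | h <;>
    exact ⟨sw_excl (by decide) (by decide) h, sw_excl (by decide) (by decide) h,
      sw_excl (by decide) (by decide) h⟩

theorem excl_G {k : String} (h : belongs_to_section k ["GSR_"] = true) :
    belongs_to_section k ["VASCULAR_"] = false := by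
  simp only [belongs_to_section, List.any_cons, List.any_nil, Bool.or_false] at h ⊢
  exact sw_excl (by decide) (by decide) h

-- single-pass loop invariant: folding stepB adds the per-section counts of l to the seeds
theorem foldB_char (l : List (String × String)) (fL tL fH tH fG tG fV tV : Int) :
    List.foldl stepB
      [("Lifestyle", [("filled", fL), ("total", tL)]),
       ("HRV", [("filled", fH), ("total", tH)]),
       ("GSR", [("filled", fG), ("total", tG)]),
       ("Vascular", [("filled", fV), ("total", tV)])] l
    = [("Lifestyle", [("filled", fL + (filC l ["LIFESTYLE_"] : Int)), ("total", tL + (totC l ["LIFESTYLE_"] : Int))]),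
       ("HRV", [("filled", fH + (filC l ["HRV_", "EMOTIONAL_"] : Int)), ("total", tH + (totC l ["HRV_", "EMOTIONAL_"] : Int))]),
       ("GSR", [("filled", fG + (filC l ["GSR_"] : Int)), ("total", tG + (totC l ["GSR_"] : Int))]),
       ("Vascular", [("filled", fV + (filC l ["VASCULAR_"] : Int)), ("total", tV + (totC l ["VASCULAR_"] : Int))])] := by
  induction l generalizing fL tL fH tH fG tG fV tV with
  | nil => simp [filC, totC]
  | cons x l ih =>
    rw [List.foldl_cons]
    by_cases he : PySem.Str.endswith x.1 "_RESULT" = true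
    all_goals have he' := he
    all_goals simp only [PySem.Str.endswith_eq,
      show "_RESULT".toList = ['_', 'R', 'E', 'S', 'U', 'L', 'T'] from rfl] at he'
    · by_cases hL : belongs_to_section x.1 ["LIFESTYLE_"] = true
      · obtain ⟨h1, h2, h3⟩ := excl_L hL
        by_cases hf : (PySem.Str.strip x.2 != "") = true <;>
        · simp only [stepB, he, routeSection, SECTION_PREFIXES, List.find?, hL, bump,
            Bool.not_true, Bool.false_eq_true, if_false, Option.map_some, List.map, hf,
            String.reduceBEq, Bool.or_true, Bool.or_false, Bool.and_true, Bool.and_false, reduceIte]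
          rw [ih]
          simp [filC, totC, he', hL, h1, h2, h3, hf]
          omega
      · by_cases hH : belongs_to_section x.1 ["HRV_", "EMOTIONAL_"] = true
        · obtain ⟨hL', h2, h3⟩ := excl_H hH
          by_cases hf : (PySem.Str.strip x.2 != "") = true <;>
          · simp only [stepB, he, routeSection, SECTION_PREFIXES, List.find?, hL', hH, bump,
              Bool.not_true, Bool.false_eq_true, if_false, Option.map_some, List.map, hf,
              String.reduceBEq, Bool.or_true, Bool.or_false, Bool.and_true, Bool.and_false, reduceIte]
            rw [ih]
            simp [filC, totC, he', hL', hH, h2, h3, hf]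
            omega
        · by_cases hG : belongs_to_section x.1 ["GSR_"] = true
          · have h3 := excl_G hG
            have hL' : belongs_to_section x.1 ["LIFESTYLE_"] = false := by simpa using hL
            have hH' : belongs_to_section x.1 ["HRV_", "EMOTIONAL_"] = false := by simpa using hH
            by_cases hf : (PySem.Str.strip x.2 != "") = true <;>
            · simp only [stepB, he, routeSection, SECTION_PREFIXES, List.find?, hL', hH', hG,
                bump, Bool.not_true, Bool.false_eq_true, if_false, Option.map_some, List.map, hf,
                String.reduceBEq, Bool.or_true, Bool.or_false, Bool.and_true, Bool.and_false, reduceIte]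
              rw [ih]
              simp [filC, totC, he', hL', hH', hG, h3, hf]
              omega
          · have hL' : belongs_to_section x.1 ["LIFESTYLE_"] = false := by simpa using hL
            have hH' : belongs_to_section x.1 ["HRV_", "EMOTIONAL_"] = false := by simpa using hH
            have hG' : belongs_to_section x.1 ["GSR_"] = false := by simpa using hG
            by_cases hV : belongs_to_section x.1 ["VASCULAR_"] = true
            · by_cases hf : (PySem.Str.strip x.2 != "") = true <;>
              · simp only [stepB, he, routeSection, SECTION_PREFIXES, List.find?, hL', hH', hG',
                  hV, bump, Bool.not_true, Bool.false_eq_true, if_false, Option.map_some,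
                  List.map, hf, String.reduceBEq, Bool.or_true,
                  Bool.or_false, Bool.and_true, Bool.and_false,
                  reduceIte]
                rw [ih]
                simp [filC, totC, he', hL', hH', hG', hV, hf]
                omega
            · have hV' : belongs_to_section x.1 ["VASCULAR_"] = false := by simpa using hV
              simp only [stepB, he, routeSection, SECTION_PREFIXES, List.find?, hL', hH', hG',
                hV', Bool.not_true, Bool.false_eq_true, if_false, Option.map_none]
              rw [ih]
              simp [filC, totC, he', hL', hH', hG', hV']
    · have he'' : PySem.Str.endswith x.1 "_RESULT" = false := by simpa using he
      simp only [stepB, he'', Bool.not_false, if_true]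
      have he3 : PySem.Chars.endswith x.1.toList ['_', 'R', 'E', 'S', 'U', 'L', 'T'] = false := by
        simpa using he'
      rw [ih]
      simp [filC, totC, he3]

-- with no duplicate keys, the first match for a member's key is that member
theorem find_self {tags : List (String × String)} (h : (tags.map Prod.fst).Nodup)
    {kv : String × String} (hm : kv ∈ tags) :
    tags.find? (fun x => x.1 == kv.1) = some kv := by
  induction tags with
  | nil => cases hm
  | cons a l ih =>
    simp only [List.map_cons, List.nodup_cons] at h
    rcases List.mem_cons.1 hm with rfl | hm'
    · simp [List.find?]
    · have hne : (a.1 == kv.1) = false := by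
        refine beq_eq_false_iff_ne.2 fun hEq => h.1 ?_
        rw [hEq]
        exact List.mem_map.2 ⟨kv, hm', rfl⟩
      simp only [List.find?, hne]
      exact ih h.2 hm'

-- A's per-section filter+count, rewritten as counts over the pairs themselves
theorem totA_eq (tags : List (String × String)) (ps : List String) :
    ((tags.map Prod.fst).filter
        (fun k => PySem.Chars.endswith k.toList ['_', 'R', 'E', 'S', 'U', 'L', 'T'] &&
          belongs_to_section k ps)).length
      = totC tags ps := by
  rw [← List.countP_eq_length_filter, List.countP_map]
  rfl

theorem filA_eq {tags : List (String × String)} (h : (tags.map Prod.fst).Nodup)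
    (ps : List String) :
    (((tags.map Prod.fst).filter
        (fun k => PySem.Chars.endswith k.toList ['_', 'R', 'E', 'S', 'U', 'L', 'T'] &&
          belongs_to_section k ps)).countP
        (fun k => PySem.Str.strip (dictGetD tags k) != ""))
      = filC tags ps := by
  rw [List.countP_filter, List.countP_map]
  refine List.countP_congr fun kv hm => ?_
  have hget : dictGetD tags kv.1 = kv.2 := by
    simp [dictGetD, find_self h hm]
  simp only [Function.comp, hget]
  constructor <;> · intro hh; simp at hh ⊢; tauto

theorem validate_section_coverage_spec : Claim_equal_validate_section_coverage := by
  intro tags _hdom hpre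
  show validate_section_coverage tags = validate_section_coverage_alt tags
  rw [validate_section_coverage_alt,
    show seedCoverage =
      [("Lifestyle", [("filled", (0 : Int)), ("total", (0 : Int))]),
       ("HRV", [("filled", (0 : Int)), ("total", (0 : Int))]),
       ("GSR", [("filled", (0 : Int)), ("total", (0 : Int))]),
       ("Vascular", [("filled", (0 : Int)), ("total", (0 : Int))])] from rfl,
    foldB_char]
  simp only [validate_section_coverage, SECTION_PREFIXES, List.foldl, List.nil_append,
    List.cons_append]
  simp [totA_eq, filA_eq hpre]
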